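-- pv_equiv track=rewrite | github.com/Sayshoo/territorialio | websocket/messageTypes.py | getBitData
-- ===== SOURCE A (Python) =====
-- import math
--
-- def getBitData(data, startIndex, size):
--     resultSize = math.ceil(size / 8) * 8
--     resultBitIndex = resultSize - size
--
--     result = [0x00] * math.ceil(size / 8)
--     for i in range(startIndex, startIndex+size):
--         currentDataByteIndex = getByteOffset(i)
--         currentResultByteIndex = getByteOffset(resultBitIndex)
--
--         shiftRightAmount = 7 - i % 8
--         shiftLeftAmount = (resultSize - 1 - resultBitIndex) % 8
--
--         currentDataByte = data[currentDataByteIndex]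
--
--         extractedBit = currentDataByte >> shiftRightAmount & 1
--
--         result[currentResultByteIndex] |= extractedBit << shiftLeftAmount
--         resultBitIndex += 1
--
--     return result
--
-- def getByteOffset(bitOffset):
--     return math.floor(bitOffset / 8)
-- ===== SOURCE B (Python) =====
-- def getBitData(data, startIndex, size):
--     nbytes = (size + 7) // 8 if size > 0 else 0
--     value = 0
--     for i in range(startIndex, startIndex + size):
--         bit = (data[i // 8] >> (7 - i % 8)) & 1
--         value = (value << 1) | bit
--     return list(value.to_bytes(nbytes, 'big'))
-- ===== Notes on version B (the rewrite author's own statement) =====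
-- stated objective: simpler
-- what changed: Replaces the preallocated byte list with per-bit byte-offset/shift bookkeeping and in-place |= scatter by a single big integer accumulator ((value<<1)|bit) converted once at the end with int.to_bytes(ceil(size/8),'big').
import Mathlib
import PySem

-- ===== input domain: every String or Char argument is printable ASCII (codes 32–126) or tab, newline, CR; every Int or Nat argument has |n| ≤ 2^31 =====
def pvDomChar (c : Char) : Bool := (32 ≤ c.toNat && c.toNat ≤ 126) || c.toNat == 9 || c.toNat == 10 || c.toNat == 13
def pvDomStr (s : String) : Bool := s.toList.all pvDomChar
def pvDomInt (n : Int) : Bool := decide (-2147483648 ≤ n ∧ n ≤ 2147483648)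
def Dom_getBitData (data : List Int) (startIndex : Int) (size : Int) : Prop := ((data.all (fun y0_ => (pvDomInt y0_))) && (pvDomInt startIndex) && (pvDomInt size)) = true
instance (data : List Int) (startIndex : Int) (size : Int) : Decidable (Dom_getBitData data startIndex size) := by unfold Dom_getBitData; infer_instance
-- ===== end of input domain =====

-- B replaces A's per-bit byte-offset/shift bookkeeping and in-place |= scatter into a
-- preallocated byte list by a single integer accumulator ((value<<1)|bit) converted once
-- at the end to big-endian bytes (objective: simpler).

-- ===== PORT A =====
-- math.floor(bitOffset / 8) : exact floor division for the ints admitted by Dom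
def getByteOffset (bitOffset : Int) : Int := PySem.Int.floordiv bitOffset 8

def getBitData (data : List Int) (startIndex : Int) (size : Int) : List Int :=
  -- math.ceil(size / 8) = (size + 7) // 8 : exact for the ints admitted by Dom
  let resultSize := PySem.Int.floordiv (size + 7) 8 * 8
  let resultBitIndex := resultSize - size
  let result := List.replicate (PySem.Int.floordiv (size + 7) 8).toNat 0  -- [0x00] * math.ceil(size/8)
  let final :=
    (PySem.List.pyRange startIndex (startIndex + size) 1).foldl
      (fun st i =>
        let result := st.1
        let resultBitIndex := st.2
        let currentDataByteIndex := getByteOffset i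
        let currentResultByteIndex := getByteOffset resultBitIndex
        let shiftRightAmount := 7 - PySem.Int.mod i 8
        let shiftLeftAmount := PySem.Int.mod (resultSize - 1 - resultBitIndex) 8
        let currentDataByte := PySem.List.pyGetD data currentDataByteIndex 0  -- data[...]; IndexError excluded by Pre_
        let extractedBit := PySem.Int.band (currentDataByte >>> shiftRightAmount.toNat) 1  -- shift amount 7 - i%8 ≥ 0
        (PySem.List.pySetD result currentResultByteIndex
          (PySem.Int.bor (PySem.List.pyGetD result currentResultByteIndex 0)
            (extractedBit <<< shiftLeftAmount.toNat)),  -- shift amount (…)%8 ≥ 0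
         resultBitIndex + 1))
      (result, resultBitIndex)
  final.1

-- ===== PORT B =====
-- int.to_bytes(n, 'big') : exact for 0 ≤ v < 256^n, which always holds for B's accumulator
def toBytesBE : Nat → Int → List Int
  | 0, _ => []
  | n+1, v => v / 256^n :: toBytesBE n (v % 256^n)

def getBitData_alt (data : List Int) (startIndex : Int) (size : Int) : List Int :=
  let nbytes := if 0 < size then PySem.Int.floordiv (size + 7) 8 else 0
  let value :=
    (PySem.List.pyRange startIndex (startIndex + size) 1).foldl
      (fun value i =>
        let bit := PySem.Int.band
          (PySem.List.pyGetD data (PySem.Int.floordiv i 8) 0 >>> (7 - PySem.Int.mod i 8).toNat) 1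
        PySem.Int.bor (value <<< (1:Nat)) bit)
      0
  toBytesBE nbytes.toNat value

-- ===== PRECONDITION & SPEC =====
-- Pre_ excludes exactly the inputs on which the Python A raises IndexError: a positive size
-- whose bit range [startIndex, startIndex+size) reaches a byte index data[i//8] outside
-- Python's accepted range (negative indices down to -len(data) are accepted by Python and
-- are read identically by both programs, so they stay inside Pre_).
def Pre_getBitData (data : List Int) (startIndex : Int) (size : Int) : Prop :=
  size ≤ 0 ∨ (-(8 * (data.length : Int)) ≤ startIndex ∧ startIndex + size ≤ 8 * (data.length : Int))
instance (data : List Int) (startIndex : Int) (size : Int) : Decidable (Pre_getBitData data startIndex size) := by unfold Pre_getBitData; infer_instance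

def pvWitness_getBitData : List Int × Int × Int := ([170, 204], 3, 7)

def Spec_getBitData (data : List Int) (startIndex : Int) (size : Int) (out : List Int) : Prop := out = getBitData_alt data startIndex size
instance (data : List Int) (startIndex : Int) (size : Int) (out : List Int) : Decidable (Spec_getBitData data startIndex size out) := by unfold Spec_getBitData; infer_instance

-- ===== CLAIM (what is proved, stated in full; the proofs are below) =====
def Claim_equal_getBitData : Prop := ∀ (data : List Int) (startIndex : Int) (size : Int), Dom_getBitData data startIndex size → Pre_getBitData data startIndex size → Spec_getBitData data startIndex size (getBitData data startIndex size)

-- ===== LEMMAS AND PROOFS =====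

-- the bit both programs extract at absolute bit position i
def bitI (data : List Int) (i : Int) : Int :=
  PySem.Int.band (PySem.List.pyGetD data (PySem.Int.floordiv i 8) 0 >>> (7 - PySem.Int.mod i 8).toNat) 1

-- the big-endian value of the first t extracted bits, starting at bit position a
def bitVal (data : List Int) (a : Int) : Nat → Int
  | 0 => 0
  | t+1 => 2 * bitVal data a t + bitI data (a + t)

-- A's loop body as a named function (definitionally equal to the lambda in the port)
def stepA (data : List Int) (resultSize : Int) : List Int × Int → Int → List Int × Int :=
  fun st i =>
    let result := st.1
    let resultBitIndex := st.2
    let currentDataByteIndex := getByteOffset i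
    let currentResultByteIndex := getByteOffset resultBitIndex
    let shiftRightAmount := 7 - PySem.Int.mod i 8
    let shiftLeftAmount := PySem.Int.mod (resultSize - 1 - resultBitIndex) 8
    let currentDataByte := PySem.List.pyGetD data currentDataByteIndex 0
    let extractedBit := PySem.Int.band (currentDataByte >>> shiftRightAmount.toNat) 1
    (PySem.List.pySetD result currentResultByteIndex
      (PySem.Int.bor (PySem.List.pyGetD result currentResultByteIndex 0)
        (extractedBit <<< shiftLeftAmount.toNat)),
     resultBitIndex + 1)

-- B's loop body as a named function (definitionally equal to the lambda in the port)
def stepB (data : List Int) : Int → Int → Int :=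
  fun value i =>
    let bit := PySem.Int.band
      (PySem.List.pyGetD data (PySem.Int.floordiv i 8) 0 >>> (7 - PySem.Int.mod i 8).toNat) 1
    PySem.Int.bor (value <<< (1:Nat)) bit

theorem getBitData_eq (data : List Int) (a size : Int) :
    getBitData data a size =
      ((PySem.List.pyRange a (a + size) 1).foldl
        (stepA data (PySem.Int.floordiv (size + 7) 8 * 8))
        (List.replicate (PySem.Int.floordiv (size + 7) 8).toNat 0,
         PySem.Int.floordiv (size + 7) 8 * 8 - size)).1 := rfl

theorem getBitData_alt_eq (data : List Int) (a size : Int) :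
    getBitData_alt data a size =
      toBytesBE (if 0 < size then PySem.Int.floordiv (size + 7) 8 else 0).toNat
        ((PySem.List.pyRange a (a + size) 1).foldl (stepB data) 0) := rfl

theorem bitI_bounds (data : List Int) (i : Int) : 0 ≤ bitI data i ∧ bitI data i < 2 := by
  unfold bitI
  rw [PySem.Int.band_one]
  exact ⟨PySem.Int.mod_nonneg _ (by norm_num), PySem.Int.mod_lt _ (by norm_num)⟩

theorem bitVal_nonneg (data : List Int) (a : Int) (t : Nat) : 0 ≤ bitVal data a t := by
  induction t with
  | zero => simp [bitVal]
  | succ t ih => have := (bitI_bounds data (a + t)).1; simp only [bitVal]; omega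

theorem bitVal_lt (data : List Int) (a : Int) (t : Nat) : bitVal data a t < 2 ^ t := by
  induction t with
  | zero => simp [bitVal]
  | succ t ih =>
    have := (bitI_bounds data (a + t)).2
    simp only [bitVal, pow_succ]
    omega

theorem natLorPow (k m : Nat) : (2^(k+1) * m) ||| 2^k = 2^(k+1)*m + 2^k := by
  induction k generalizing m with
  | zero =>
    have := Nat.lor_bit false m true 0
    simp [Nat.bit_val] at this
    omega
  | succ k ih =>
    have h1 : 2^(k+1+1) * m = Nat.bit false (2^(k+1) * m) := by simp [Nat.bit_val]; ring
    have h2 : 2^(k+1) = Nat.bit false (2^k) := by simp [Nat.bit_val]; ring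
    rw [h2, h1, Nat.lor_bit, Bool.or_false, ih]
    simp [Nat.bit_val]; ring

-- or-ing a single bit into a position whose low neighbourhood is zero is addition
theorem bor_pow (a d : Int) (k : Nat) (ha : 0 ≤ a) (hz : a % 2^(k+1) = 0)
    (hd0 : 0 ≤ d) (hd2 : d < 2) : PySem.Int.bor a (d * 2^k) = a + d * 2^k := by
  have hd : d = 0 ∨ d = 1 := by omega
  rcases hd with rfl | rfl
  · simp
  · obtain ⟨m, hm⟩ := Int.dvd_of_emod_eq_zero hz
    have hm0 : 0 ≤ m := by nlinarith [pow_pos (show (0:Int) < 2 by norm_num) (k+1)]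
    have htn : a.toNat = 2^(k+1) * m.toNat := by
      have : (↑(2^(k+1) * m.toNat) : Int) = a := by push_cast [Int.toNat_of_nonneg hm0]; omega
      omega
    have h2k : ((2:Int)^k).toNat = 2^k := by
      have : ((2:Int)^k) = ((2^k : Nat) : Int) := by push_cast; ring
      rw [this, Int.toNat_natCast]
    rw [one_mul, PySem.Int.bor_of_nonneg ha (by positivity), htn, h2k, natLorPow]
    push_cast [Int.toNat_of_nonneg hm0]
    omega

theorem toBE_zero (n : Nat) : toBytesBE n 0 = List.replicate n 0 := by
  induction n with
  | zero => rfl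
  | succ n ih => simp [toBytesBE, ih, List.replicate_succ]

-- or-ing bit d into bit position e (= byte j from the left, in-byte position k) of the
-- byte list of w is the byte list of w + d·2^e, provided bits ≤ e of w are still zero
theorem toBE_step (n : Nat) : ∀ (j k e : Nat) (w d : Int), 0 ≤ w → w < 256^n → 0 ≤ d → d < 2 →
    j < n → k < 8 → e = 8*(n-1-j) + k → w % 2^(e+1) = 0 →
    (toBytesBE n w).set j (PySem.Int.bor ((toBytesBE n w).getD j 0) (d * 2^k))
      = toBytesBE n (w + d * 2^e) := by
  induction n with
  | zero => intro j k e w d _ _ _ _ hj; omega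
  | succ n ih =>
    intro j k e w d hw0 hwn hd0 hd2 hj hk he hz
    have hQpos : (0:Int) < 256^n := by positivity
    have hQ : (256:Int)^n = 2^(8*n) := by
      rw [show (256:Int) = 2^8 by norm_num, ← pow_mul]
    cases j with
    | zero =>
      have he' : e = 8*n + k := by omega
      obtain ⟨m, hm⟩ := Int.dvd_of_emod_eq_zero hz
      have hmw : w = 256^n * (2^(k+1) * m) := by rw [hm, he', hQ]; ring
      have hdiv : w / 256^n = 2^(k+1) * m := by
        rw [hmw, Int.mul_ediv_cancel_left _ (by positivity)]
      have hz' : (w / 256^n) % 2^(k+1) = 0 := by rw [hdiv, Int.mul_emod_right]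
      have ha : 0 ≤ w / 256^n := Int.ediv_nonneg hw0 (by positivity)
      simp only [toBytesBE, List.getD_cons_zero, List.set_cons_zero]
      rw [bor_pow _ _ _ ha hz' hd0 hd2]
      have h1 : (w + d * 2^e) / 256^n = w / 256^n + d * 2^k := by
        rw [show w + d * 2^e = w + (d * 2^k) * 256^n by rw [he', hQ]; ring,
            Int.add_mul_ediv_right _ _ (by positivity)]
      have h2 : (w + d * 2^e) % 256^n = w % 256^n := by
        rw [show w + d * 2^e = w + (d * 2^k) * 256^n by rw [he', hQ]; ring,
            Int.add_mul_emod_self_right]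
      rw [h1, h2]
    | succ j =>
      have hj' : j < n := by omega
      have he' : e = 8*(n-1-j) + k := by omega
      have he1 : e + 1 ≤ 8*n := by omega
      have hdvdQ : (2:Int)^(e+1) ∣ 256^n := by rw [hQ]; exact pow_dvd_pow 2 he1
      set w' := w % 256^n with hw'
      have hw'0 : 0 ≤ w' := Int.emod_nonneg w (by positivity)
      have hw'Q : w' < 256^n := Int.emod_lt_of_pos w hQpos
      have hz' : w' % 2^(e+1) = 0 := by rw [hw', Int.emod_emod_of_dvd w hdvdQ, hz]
      obtain ⟨b, hb⟩ := Int.dvd_of_emod_eq_zero hz'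
      obtain ⟨c, hc⟩ := hdvdQ
      have hP : (0:Int) < 2^e := by positivity
      have hbc : b < c := by
        have h2 : (0:Int) < 2^(e+1) := by positivity
        have := hw'Q
        rw [hb, hc] at this
        exact lt_of_mul_lt_mul_left this (le_of_lt h2)
      have hcarry : w' + d * 2^e < 256^n := by
        rw [hb, hc, pow_succ]
        nlinarith
      have h1 : (w + d * 2^e) / 256^n = w / 256^n := by
        have hsplit : w + d * 2^e = (w' + d * 2^e) + (w / 256^n) * 256^n := by
          have h := Int.mul_ediv_add_emod w (256^n)
          linarith
        rw [hsplit, Int.add_mul_ediv_right _ _ (by positivity),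
            Int.ediv_eq_zero_of_lt (by positivity) hcarry, zero_add]
      have h2 : (w + d * 2^e) % 256^n = w' + d * 2^e := by
        have hsplit : w + d * 2^e = (w' + d * 2^e) + (w / 256^n) * 256^n := by
          have h := Int.mul_ediv_add_emod w (256^n)
          linarith
        rw [hsplit, Int.add_mul_emod_self_right, Int.emod_eq_of_lt (by positivity) hcarry]
      simp only [toBytesBE, List.getD_cons_succ, List.set_cons_succ]
      rw [h1, h2, ih j k e w' d hw'0 hw'Q hd0 hd2 hj' hk he' hz']

-- A's loop keeps its byte list equal to the byte rendering of the value read so far,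
-- left-shifted by the number of bits still to come
theorem loopA (data : List Int) (a size : Int) (n sz : Nat)
    (hsz : (size:Int) = (sz:Int)) (hlo : sz ≤ 8*n) (hhi : 8*n ≤ sz + 7) :
    ∀ t : Nat, t ≤ sz →
    (PySem.List.pyRange a (a + t) 1).foldl (stepA data (8*(n:Int)))
        (List.replicate n 0, 8*(n:Int) - size)
      = (toBytesBE n (bitVal data a t * 2^(sz - t)), 8*(n:Int) - size + t) := by
  intro t
  induction t with
  | zero =>
    intro _
    rw [show a + (0:Nat) = a by norm_num, PySem.List.pyRange_one_eq_nil (le_refl a)]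
    simp [bitVal, toBE_zero]
  | succ t ih =>
    intro ht
    rw [show a + ((t+1 : Nat) : Int) = (a + t) + 1 by push_cast; ring,
        PySem.List.pyRange_one_succ_right (by omega : a ≤ a + (t:Int)),
        List.foldl_append, ih (by omega)]
    set w : Int := bitVal data a t * 2^(sz - t) with hw
    have hr0 : (0:Int) ≤ 8*(n:Int) - size := by rw [hsz]; omega
    set p : Int := 8*(n:Int) - size + t with hp
    have hp0 : 0 ≤ p := by omega
    set pn : Nat := p.toNat with hpn
    have hpeq : (pn:Int) = p := Int.toNat_of_nonneg hp0
    have hpnlt : pn < 8*n := by omega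
    set q : Nat := 8*n - 1 - pn with hqdef
    have hq1 : q + 1 = sz - t := by omega
    have hfd : PySem.Int.floordiv (pn:Int) 8 = ((pn/8 : Nat) : Int) := by
      exact_mod_cast PySem.Int.floordiv_natCast pn 8
    have hmd : PySem.Int.mod ((q:Int)) 8 = ((q%8 : Nat) : Int) := by
      exact_mod_cast PySem.Int.mod_natCast q 8
    have hq' : 8*(n:Int) - 1 - (pn:Int) = ((8*n-1-pn : Nat) : Int) := by  omega
    have hstep : stepA data (8*(n:Int)) (toBytesBE n w, p) (a + t)
        = ((toBytesBE n w).set (pn/8)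
            (PySem.Int.bor ((toBytesBE n w).getD (pn/8) 0) (bitI data (a+t) * 2^(q % 8))),
           p + 1) := by
      show (PySem.List.pySetD (toBytesBE n w) (PySem.Int.floordiv p 8)
              (PySem.Int.bor (PySem.List.pyGetD (toBytesBE n w) (PySem.Int.floordiv p 8) 0)
                (bitI data (a+t) <<< (PySem.Int.mod (8*(n:Int) - 1 - p) 8).toNat)), p + 1) = _
      rw [← hpeq, hq', hfd, hmd, Int.toNat_natCast]
      rw [PySem.List.pySetD_natCast, PySem.List.pyGetD_natCast]
      rw [Int.shiftLeft_eq]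
    simp only [List.foldl_cons, List.foldl_nil]
    rw [hstep]
    have hbit := bitI_bounds data (a + t)
    have hVpos := bitVal_nonneg data a t
    have hVlt := bitVal_lt data a t
    have hw0 : 0 ≤ w := by positivity
    have hwn : w < 256^n := by
      have h1 : w < 2^t * 2^(sz-t) := by
        apply mul_lt_mul_of_pos_right hVlt; positivity
      have h2 : (2:Int)^t * 2^(sz-t) = 2^sz := by rw [← pow_add]; congr 1; omega
      have h3 : ((256:Int))^n = 2^(8*n) := by rw [show (256:Int) = 2^8 by norm_num, ← pow_mul]
      have h4 : (2:Int)^sz ≤ 2^(8*n) := by apply pow_le_pow_right₀ (by norm_num) hlo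
      omega
    have hzz : w % 2^(q+1) = 0 := by rw [hq1, hw, Int.mul_emod_left]
    rw [toBE_step n (pn/8) (q%8) q w (bitI data (a+t)) hw0 hwn hbit.1 hbit.2
        (by omega) (by omega) (by omega) hzz]
    rw [Prod.mk.injEq]
    constructor
    · congr 1
      rw [hw]
      have h5 : sz - t = (sz - (t+1)) + 1 := by omega
      have h6 : q = sz - (t+1) := by omega
      rw [h5, h6, pow_succ, show bitVal data a (t+1) = 2 * bitVal data a t + bitI data (a + t) from rfl]
      ring
    · show 8*(n:Int) - size + t + 1 = 8*(n:Int) - size + (t+1:Nat)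
      push_cast; ring

-- B's loop computes exactly bitVal
theorem loopB (data : List Int) (a : Int) :
    ∀ t : Nat, (PySem.List.pyRange a (a + t) 1).foldl (stepB data) 0 = bitVal data a t := by
  intro t
  induction t with
  | zero =>
    rw [show a + (0:Nat) = a by norm_num, PySem.List.pyRange_one_eq_nil (le_refl a)]
    rfl
  | succ t ih =>
    rw [show a + ((t+1 : Nat) : Int) = (a + t) + 1 by push_cast; ring,
        PySem.List.pyRange_one_succ_right (by omega : a ≤ a + (t:Int)),
        List.foldl_append, ih]
    simp only [List.foldl_cons, List.foldl_nil]
    show PySem.Int.bor (bitVal data a t <<< (1:Nat)) (bitI data (a + t)) = bitVal data a (t+1)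
    have hV := bitVal_nonneg data a t
    have hbit := bitI_bounds data (a + t)
    have h1 : bitVal data a t <<< (1:Nat) = bitVal data a t * 2 := by
      rw [Int.shiftLeft_eq]; ring
    have h2 := bor_pow (bitVal data a t * 2) (bitI data (a + t)) 0
      (by omega) (by rw [pow_one]; exact Int.mul_emod_left _ _) hbit.1 hbit.2
    simp only [pow_zero, mul_one] at h2
    rw [h1, h2, show bitVal data a (t+1) = 2 * bitVal data a t + bitI data (a + t) from rfl]
    ring

-- ===== VERDICT (by name: the statement is the Claim_ definition above) =====
theorem getBitData_spec : Claim_equal_getBitData := by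
  unfold Claim_equal_getBitData
  intro data a size _ _
  unfold Spec_getBitData
  rw [getBitData_eq, getBitData_alt_eq]
  by_cases hpos : 0 < size
  · set sz : Nat := size.toNat with hszdef
    have hsz : (size:Int) = (sz:Int) := by omega
    set N : Int := PySem.Int.floordiv (size + 7) 8 with hN
    have hNsz : N * 8 ≤ size + 7 ∧ size + 7 < (N+1) * 8 :=
      (PySem.Int.floordiv_eq_iff_of_pos (by norm_num)).mp hN.symm
    have hN0 : 0 ≤ N := by omega
    set n : Nat := N.toNat with hn
    have hnN : (n:Int) = N := Int.toNat_of_nonneg hN0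
    have hlo : sz ≤ 8*n := by omega
    have hhi : 8*n ≤ sz + 7 := by omega
    have hrange : a + size = a + (sz:Int) := by rw [hsz]
    rw [if_pos hpos, hrange, ← hnN,
        show (n:Int) * 8 = 8*(n:Int) by ring,
        loopA data a size n sz hsz hlo hhi sz (le_refl sz),
        loopB data a sz]
    show toBytesBE n (bitVal data a sz * 2^(sz - sz)) = toBytesBE N.toNat (bitVal data a sz)
    rw [Nat.sub_self, pow_zero, mul_one, hn]
  · have hle : size ≤ 0 := by omega
    rw [if_neg hpos]
    have hnil : PySem.List.pyRange a (a + size) 1 = [] :=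
      PySem.List.pyRange_one_eq_nil (by omega)
    have hN0 : PySem.Int.floordiv (size + 7) 8 ≤ 0 := by
      have := PySem.Int.floordiv_lt_iff_lt_mul (a := size + 7) (b := 8) (q := 1) (by norm_num)
      omega
    rw [hnil]
    simp only [List.foldl_nil]
    show (List.replicate (PySem.Int.floordiv (size + 7) 8).toNat 0 : List Int) = toBytesBE (0:Int).toNat 0
    rw [show (PySem.Int.floordiv (size + 7) 8).toNat = 0 by omega]
    rfl
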